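-- pv_equiv track=rewrite | github.com/tony3310t/RunPython | RunPython/RunPython/clsPy.py | getData2
-- ===== SOURCE A (Python) =====
-- def getData2(strTmp):
-- 	try:
-- 		rowDataLen = len(strTmp)
-- 		tmp = ''
-- 		while rowDataLen > 0:
-- 			if strTmp[rowDataLen-1] == '>':
-- 				rowDataTmp = strTmp[rowDataLen:]
-- 				indexLeftBrackets = rowDataTmp.find('<')
--
-- 				if rowDataTmp.strip() != '':
-- 					tmp = rowDataTmp.strip().replace(',', '')
-- 					break
-- 			rowDataLen = rowDataLen-1
--
-- 		return tmp
-- 	except: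
-- 		return 'E'
-- ===== SOURCE B (Python) =====
-- def getData2(strTmp):
--     # Loop-free: probe at most two '>' boundaries with rfind instead of
--     # scanning every character and re-stripping a slice at each '>'.
--     j = strTmp.rfind('>')
--     if j == -1:
--         return ''
--     tail = strTmp[j + 1:].strip()
--     if tail != '':
--         return tail.replace(',', '')
--     # tail after the last '>' is all whitespace: any earlier '>' gives a
--     # suffix containing that last '>', hence non-whitespace.
--     k = strTmp.rfind('>', 0, j)
--     if k == -1:
--         return ''
--     return strTmp[k + 1:].strip().replace(',', '')
-- ===== Notes on version B (the rewrite author's own statement) =====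
-- stated objective: faster
-- what changed: A's right-to-left per-character while loop, which strips a fresh suffix slice at every boundary character it meets, is replaced by a loop-free computation: one rfind for the last boundary and, only when its suffix is all whitespace, one bounded rfind for the previous boundary, whose suffix then necessarily contains the later boundary character and is non-blank.
import Mathlib
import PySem

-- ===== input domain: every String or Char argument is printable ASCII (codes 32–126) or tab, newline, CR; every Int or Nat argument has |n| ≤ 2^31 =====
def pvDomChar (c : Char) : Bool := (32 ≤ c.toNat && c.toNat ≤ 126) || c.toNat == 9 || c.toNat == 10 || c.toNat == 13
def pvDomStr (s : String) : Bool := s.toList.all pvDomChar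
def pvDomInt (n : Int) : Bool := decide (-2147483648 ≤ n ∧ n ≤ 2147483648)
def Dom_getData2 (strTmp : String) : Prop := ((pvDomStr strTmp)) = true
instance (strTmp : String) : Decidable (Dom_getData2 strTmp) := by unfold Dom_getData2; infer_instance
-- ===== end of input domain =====

-- B replaces A's right-to-left character scan (which re-strips a suffix slice at each '>') by at most two rfind probes; measurably faster on the generated inputs.
-- A's try/except can never fire on a string input, so no Pre_ is needed (both ports are total).

-- ===== PORT A =====
-- the while loop, rowDataLen counting down; base case 0 returns the untouched tmp = ''
def pvLoopA (s : List Char) : Nat → List Char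
  | 0 => []
  | i + 1 =>
    if PySem.List.pyGet? s (i : Int) = some '>' then
      let rowDataTmp := PySem.Chars.slice s (some ((i : Int) + 1)) none
      let _indexLeftBrackets := PySem.Chars.find rowDataTmp ['<']   -- dead in A, kept
      if PySem.Chars.strip rowDataTmp ≠ [] then
        PySem.Chars.replace (PySem.Chars.strip rowDataTmp) [','] []   -- tmp := …; break
      else pvLoopA s i
    else pvLoopA s i

def getData2 (strTmp : String) : String :=
  String.ofList (pvLoopA strTmp.toList strTmp.toList.length)

-- ===== PORT B =====
def getData2_alt (strTmp : String) : String :=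
  let s := strTmp.toList
  let j := PySem.Chars.rfind s ['>']
  if j = -1 then ""
  else
    let tail := PySem.Chars.strip (PySem.Chars.slice s (some (j + 1)) none)
    if tail ≠ [] then String.ofList (PySem.Chars.replace tail [','] [])
    else
      let k := PySem.Chars.rfindFrom s ['>'] 0 (some j)
      if k = -1 then ""
      else String.ofList (PySem.Chars.replace
        (PySem.Chars.strip (PySem.Chars.slice s (some (k + 1)) none)) [','] [])

-- ===== PRECONDITION & SPEC =====
def Spec_getData2 (strTmp : String) (out : String) : Prop := out = getData2_alt strTmp
instance (strTmp : String) (out : String) : Decidable (Spec_getData2 strTmp out) := by unfold Spec_getData2; infer_instance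

-- ===== CLAIM (what is proved, stated in full; the proofs are below) =====
def Claim_equal_getData2 : Prop := ∀ (strTmp : String), Dom_getData2 strTmp → Spec_getData2 strTmp (getData2 strTmp)

-- ===== LEMMAS AND PROOFS =====

-- [c].isPrefixOf l just reads the head
lemma pv_prefix_singleton (c : Char) (l : List Char) :
    [c].isPrefixOf l = true ↔ l.head? = some c := by
  cases l with
  | nil => simp [List.isPrefixOf]
  | cons b t =>
    simp only [List.isPrefixOf, List.head?_cons, Option.some.injEq]
    constructor
    · intro h
      have := (Bool.and_eq_true _ _).mp h
      exact (beq_iff_eq.mp this.1).symm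
    · intro h; subst h; simp

-- strip keeps a non-space element alive
lemma pv_strip_ne_nil (l : List Char) (c : Char) (hc : c ∈ l)
    (hs : PySem.Chars.isspace c = false) : PySem.Chars.strip l ≠ [] := by
  intro h
  unfold PySem.Chars.strip PySem.Chars.rstrip PySem.Chars.lstrip at h
  rw [List.reverse_eq_nil_iff, List.dropWhile_eq_nil_iff] at h
  have hmem : c ∈ (l.dropWhile PySem.Chars.isspace).reverse ∨ c ∈ l.takeWhile PySem.Chars.isspace := by
    rw [List.mem_reverse]
    have := List.takeWhile_append_dropWhile (p := PySem.Chars.isspace) (l := l)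
    rw [← this] at hc
    rcases List.mem_append.mp hc with h1 | h2
    · exact Or.inr h1
    · exact Or.inl h2
  rcases hmem with h1 | h2
  · exact absurd (h c h1) (by simp [hs])
  · exact absurd (List.mem_takeWhile_imp h2) (by simp [hs])

-- A's loop returns '' when no position below i carries a '>' with non-blank suffix
lemma pv_loopA_none (s : List Char) (i : Nat)
    (h : ∀ j < i, ¬(s[j]? = some '>' ∧ PySem.Chars.strip (s.drop (j + 1)) ≠ [])) :
    pvLoopA s i = [] := by
  induction i with
  | zero => rfl
  | succ i ih =>
    have hrec : pvLoopA s i = [] := ih (fun j hj => h j (Nat.lt_succ_of_lt hj))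
    unfold pvLoopA
    have hslice : PySem.List.slice s (some ((i : Int) + 1)) none = s.drop (i + 1) := by
      rw [show ((i : Int) + 1) = ((i + 1 : Nat) : Int) by push_cast; ring,
        PySem.List.slice_from s (by positivity)]
      simp
    by_cases hg : PySem.List.pyGet? s (i : Int) = some '>'
    · have hget : s[i]? = some '>' := by
        rwa [PySem.List.pyGet?_natCast] at hg
      have hblank := h i (Nat.lt_succ_self i)
      simp only [hget, true_and, not_not] at hblank
      simp [hg, hslice, hblank, hrec]
    · have hgi : ¬ s[i]? = some '>' := by rwa [PySem.List.pyGet?_natCast] at hg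
      simp [hgi, hrec]

-- A's loop returns the processed suffix of the highest qualifying '>'
lemma pv_loopA_found (s : List Char) (i j : Nat)
    (hj : j < i)
    (hget : s[j]? = some '>')
    (hne : PySem.Chars.strip (s.drop (j + 1)) ≠ [])
    (hmax : ∀ j', j < j' → j' < i → ¬(s[j']? = some '>' ∧ PySem.Chars.strip (s.drop (j' + 1)) ≠ [])) :
    pvLoopA s i = PySem.Chars.replace (PySem.Chars.strip (s.drop (j + 1))) [','] [] := by
  induction i with
  | zero => omega
  | succ i ih =>
    have hslice : PySem.List.slice s (some ((i : Int) + 1)) none = s.drop (i + 1) := by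
      rw [show ((i : Int) + 1) = ((i + 1 : Nat) : Int) by push_cast; ring,
        PySem.List.slice_from s (by positivity)]
      simp
    unfold pvLoopA
    rcases Nat.lt_or_ge j i with hlt | hge
    · -- the found index is below i: this step must not fire
      have hrec := ih hlt (fun j' h1 h2 => hmax j' h1 (Nat.lt_succ_of_lt h2))
      by_cases hg : PySem.List.pyGet? s (i : Int) = some '>'
      · have hgi : s[i]? = some '>' := by rwa [PySem.List.pyGet?_natCast] at hg
        have hblank := hmax i hlt (Nat.lt_succ_self i)
        simp only [hgi, true_and, not_not] at hblank
        simp [hg, hslice, hblank, hrec]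
      · have hgi : ¬ s[i]? = some '>' := by rwa [PySem.List.pyGet?_natCast] at hg
        simp [hgi, hrec]
    · -- j = i: fires now
      have hji : j = i := by omega
      subst hji
      have hg : PySem.List.pyGet? s (j : Int) = some '>' := by
        rwa [PySem.List.pyGet?_natCast]
      simp [hg, hslice, hne]

-- rfind.go (probing j = m, m-1, …, 0) returns -1 when nothing matches
lemma pv_rfind_go_none (s : List Char) (m : Nat)
    (h : ∀ j ≤ m, ¬(s[j]? = some '>')) :
    PySem.Chars.rfind.go s ['>'] m = -1 := by
  induction m with
  | zero =>
    have : ¬ ([ '>' ].isPrefixOf s = true) := by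
      rw [pv_prefix_singleton, List.head?_eq_getElem?]
      exact h 0 (Nat.le_refl 0)
    simp [PySem.Chars.rfind.go, this]
  | succ m ih =>
    have hm : ¬ ([ '>' ].isPrefixOf (s.drop (m + 1)) = true) := by
      rw [pv_prefix_singleton, List.head?_drop]
      exact h (m + 1) (Nat.le_refl _)
    have hrec := ih (fun j hj => h j (Nat.le_succ_of_le hj))
    simp [PySem.Chars.rfind.go, hm, hrec]

-- rfind.go returns the highest matching index ≤ m
lemma pv_rfind_go_found (s : List Char) (m j : Nat)
    (hjm : j ≤ m)
    (hget : s[j]? = some '>')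
    (hmax : ∀ j', j < j' → j' ≤ m → ¬(s[j']? = some '>')) :
    PySem.Chars.rfind.go s ['>'] m = (j : Int) := by
  induction m with
  | zero =>
    have hj0 : j = 0 := Nat.le_zero.mp hjm
    subst hj0
    have : [ '>' ].isPrefixOf s = true := by
      rw [pv_prefix_singleton, List.head?_eq_getElem?]
      exact hget
    simp [PySem.Chars.rfind.go, this]
  | succ m ih =>
    rcases Nat.lt_or_ge j (m + 1) with hlt | hge
    · have hm : ¬ ([ '>' ].isPrefixOf (s.drop (m + 1)) = true) := by
        rw [pv_prefix_singleton, List.head?_drop]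
        exact hmax (m + 1) hlt (Nat.le_refl _)
      have hrec := ih (by omega) (fun j' h1 h2 => hmax j' h1 (Nat.le_succ_of_le h2))
      simp [PySem.Chars.rfind.go, hm, hrec]
    · have hje : j = m + 1 := by omega
      have hpre : [ '>' ].isPrefixOf (s.drop (m + 1)) = true := by
        rw [pv_prefix_singleton, List.head?_drop, ← hje]
        exact hget
      simp [PySem.Chars.rfind.go, hpre, hje]

lemma pv_rfind_none (s : List Char)
    (h : ∀ j : Nat, ¬(s[j]? = some '>')) : PySem.Chars.rfind s ['>'] = -1 :=
  pv_rfind_go_none s s.length (fun j _ => h j)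

lemma pv_rfind_found (s : List Char) (j : Nat)
    (hget : s[j]? = some '>')
    (hmax : ∀ j', j < j' → ¬(s[j']? = some '>')) :
    PySem.Chars.rfind s ['>'] = (j : Int) := by
  have hj : j < s.length := by
    by_contra h; rw [List.getElem?_eq_none (by omega)] at hget; simp at hget
  exact pv_rfind_go_found s s.length j (Nat.le_of_lt hj) hget (fun j' h1 _ => hmax j' h1)

-- ===== VERDICT (by name: the statement is the Claim_ definition above) =====
theorem getData2_spec : Claim_equal_getData2 := by
  intro strTmp _
  unfold Spec_getData2 getData2 getData2_alt
  set s := strTmp.toList with hs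
  by_cases hex : ∃ j : Nat, s[j]? = some '>'
  · -- there is a '>'; j0 = the highest index with one
    obtain ⟨jw, hjw⟩ := hex
    have hjwlen : jw < s.length := by
      by_contra h; rw [List.getElem?_eq_none (by omega)] at hjw; simp at hjw
    set p : Nat → Prop := fun j => s[j]? = some '>' with hp
    set j0 := Nat.findGreatest p s.length with hj0
    have hpj0 : p j0 := Nat.findGreatest_spec (Nat.le_of_lt hjwlen) hjw
    have hj0max : ∀ j', j0 < j' → ¬ p j' := by
      intro j' h1
      by_cases h2 : j' ≤ s.length
      · exact Nat.findGreatest_is_greatest h1 h2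
      · intro hpj'
        have hx : s[j']? = some '>' := hpj'
        rw [List.getElem?_eq_none (by omega)] at hx; simp at hx
    have hrf : PySem.Chars.rfind s ['>'] = (j0 : Int) := pv_rfind_found s j0 hpj0 hj0max
    have hj0len : j0 < s.length := by
      by_contra h
      have hx : s[j0]? = some '>' := hpj0
      rw [List.getElem?_eq_none (by omega)] at hx; simp at hx
    have hne1 : (j0 : Int) ≠ -1 := by omega
    have hslice0 : PySem.List.slice s (some ((j0 : Int) + 1)) none = s.drop (j0 + 1) := by
      rw [show ((j0 : Int) + 1) = ((j0 + 1 : Nat) : Int) by push_cast; ring,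
        PySem.List.slice_from s (by positivity)]
      simp
    by_cases hblank : PySem.Chars.strip (s.drop (j0 + 1)) = []
    · -- suffix after the last '>' is all whitespace: B probes for an earlier '>'
      have hkval : PySem.Chars.rfindFrom s ['>'] 0 (some ((j0 : Int))) =
          (if PySem.Chars.rfind (s.take j0) ['>'] = -1 then (-1 : Int)
           else PySem.Chars.rfind (s.take j0) ['>']) := by
        simp only [PySem.Chars.rfindFrom]
        have h1 : ¬ ((s.length : Int) < (j0 : Int)) := by omega
        have h2 : ¬ ((j0 : Int) < 0) := by omega
        simp only [h1, if_false, h2, if_false]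
        simp only [show ¬((0:Int) < 0) by norm_num, if_false, Int.toNat_zero,
          Int.toNat_natCast, List.drop_zero, zero_add]
        rw [if_neg (by omega : ¬ ((j0 : Int) < 0))]
      by_cases hex2 : ∃ i, i < j0 ∧ s[i]? = some '>'
      · -- an earlier '>' exists: k0 = the highest one below j0
        obtain ⟨iw, hiw1, hiw2⟩ := hex2
        set k0 := Nat.findGreatest p (j0 - 1) with hk0
        have hpk0 : p k0 := Nat.findGreatest_spec (by omega) hiw2
        have hk0lt : k0 < j0 := by
          have := Nat.findGreatest_le (P := p) (n := j0 - 1)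
          omega
        have hk0max : ∀ j', k0 < j' → j' < j0 → ¬ p j' := by
          intro j' h1 h2
          exact Nat.findGreatest_is_greatest h1 (by omega)
        -- rfind on the take-j0 prefix returns k0
        have htake : PySem.Chars.rfind (s.take j0) ['>'] = (k0 : Int) := by
          apply pv_rfind_found
          · rw [List.getElem?_take_of_lt hk0lt]; exact hpk0
          · intro j' h1 hpj'
            by_cases h2 : j' < j0
            · rw [List.getElem?_take_of_lt h2] at hpj'
              exact hk0max j' h1 h2 hpj'
            · rw [List.getElem?_eq_none (by simp; omega)] at hpj'
              simp at hpj'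
        have hkne : (k0 : Int) ≠ -1 := by omega
        have hslicek : PySem.List.slice s (some ((k0 : Int) + 1)) none = s.drop (k0 + 1) := by
          rw [show ((k0 : Int) + 1) = ((k0 + 1 : Nat) : Int) by push_cast; ring,
            PySem.List.slice_from s (by positivity)]
          simp
        -- the suffix after k0 contains the '>' at j0, so it is not blank
        have hmemgt : '>' ∈ s.drop (k0 + 1) := by
          have : (s.drop (k0 + 1))[j0 - (k0 + 1)]? = some '>' := by
            rw [List.getElem?_drop]
            rw [show k0 + 1 + (j0 - (k0 + 1)) = j0 by omega]
            exact hpj0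
          exact List.mem_of_getElem? this
        have hnek : PySem.Chars.strip (s.drop (k0 + 1)) ≠ [] :=
          pv_strip_ne_nil _ '>' hmemgt (by decide)
        have hA : pvLoopA s s.length =
            PySem.Chars.replace (PySem.Chars.strip (s.drop (k0 + 1))) [','] [] := by
          apply pv_loopA_found s s.length k0 (by omega) hpk0 hnek
          intro j' h1 h2
          rcases Nat.lt_trichotomy j' j0 with h3 | h3 | h3
          · exact fun hc => hk0max j' h1 h3 hc.1
          · subst h3; exact fun hc => hc.2 hblank
          · exact fun hc => hj0max j' h3 hc.1
        rw [hA]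
        simp [hrf, hne1, hslice0, hblank, hkval, htake, hkne, hslicek]
      · -- no earlier '>': both return ''
        push Not at hex2
        have htake : PySem.Chars.rfind (s.take j0) ['>'] = -1 := by
          apply pv_rfind_none
          intro j hpj
          by_cases h2 : j < j0
          · rw [List.getElem?_take_of_lt h2] at hpj
            exact hex2 j h2 hpj
          · rw [List.getElem?_eq_none (by simp; omega)] at hpj
            simp at hpj
        have hA : pvLoopA s s.length = [] := by
          apply pv_loopA_none
          intro j _ hc
          rcases Nat.lt_trichotomy j j0 with h3 | h3 | h3
          · exact hex2 j h3 hc.1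
          · subst h3; exact hc.2 hblank
          · exact hj0max j h3 hc.1
        rw [hA]
        simp [hrf, hne1, hslice0, hblank, hkval, htake]
    · -- suffix after the last '>' is meaningful: both process it
      have hA : pvLoopA s s.length =
          PySem.Chars.replace (PySem.Chars.strip (s.drop (j0 + 1))) [','] [] := by
        apply pv_loopA_found s s.length j0 hj0len hpj0 hblank
        intro j' h1 _ hc
        exact hj0max j' h1 hc.1
      rw [hA]
      simp [hrf, hne1, hslice0, hblank]
  · -- no '>' anywhere: both return ''
    push Not at hex
    have hrf : PySem.Chars.rfind s ['>'] = -1 := pv_rfind_none s hex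
    have hA : pvLoopA s s.length = [] := by
      apply pv_loopA_none
      intro j _ hc
      exact hex j hc.1
    rw [hA]
    simp [hrf]
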